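-- pv_equiv track=rewrite | github.com/hajraQURESHI/HTMLFILE | 2021_MC_33_CEP1.py | infeasibleSteps
-- ===== SOURCE A (Python) =====
-- mazeSizeInX=15 #no of columns in a maze
--
-- mazeSizeInY=15 #no of rows in a maze
--
-- def findingCoordinates(chrom):
--     coord,b=[],0
--     var2=1           #var2 will be use in every condition
--     for j in range(len(chrom)-1):
--
--         #first condition
--         if chrom[j]<chrom[j+1]:
--             b=chrom[j]
--             while (b!=chrom[j+1]+1):
--                 coord.append((b,var2))
--                 b+=1
--             var2+=1
--         #second condition
--         if chrom[j]>chrom[j+1]: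
--             b=chrom[j]
--             while (b!=chrom[j+1]-1):
--                 coord.append((b,var2))
--                 b-=1
--             var2+=1
--         # Third condition
--         if chrom[j]==chrom[j+1]:
--             coord.append((chrom[j],var2))
--             var2+=1
--     coord.append((mazeSizeInY,mazeSizeInX))
--     return coord
--
-- def FindingDirections(chrom):
--     directions={}
--     for i in range(len(chrom)-1):
--         if chrom[i][0]>chrom[i+1][0]:
--             directions[chrom[i]]='N'
--         elif chrom[i][0]<chrom[i+1][0]:
--             directions[chrom[i]]='S'
--         else:
--             if chrom[i][1]>chrom[i+1][1]:
--                 directions[chrom[i]]='W'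
--             elif chrom[i][1]<chrom[i+1][1]:
--                 directions[chrom[i]]='E'
--     return directions
--
-- def infeasibleSteps(chrom,maze_map):
--     b=findingCoordinates(chrom)
--     x=FindingDirections(b)
--     infesibleSteps = 0
--     for coordinate, direction in x.items():
--         if maze_map[coordinate][direction] == 0:
--             infesibleSteps += 1
--     return infesibleSteps
-- ===== SOURCE B (Python) =====
-- mazeSizeInX = 15  # no of columns in a maze
-- mazeSizeInY = 15  # no of rows in a maze
--
-- def _assign(directions, prev, cur):
--     # record the direction from prev to cur (if any) and return cur as the new prev
--     if prev is not None:
--         if prev[0] > cur[0]: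
--             directions[prev] = 'N'
--         elif prev[0] < cur[0]:
--             directions[prev] = 'S'
--         elif prev[1] > cur[1]:
--             directions[prev] = 'W'
--         elif prev[1] < cur[1]:
--             directions[prev] = 'E'
--     return cur
--
-- def infeasibleSteps(chrom, maze_map):
--     # single streaming pass: generate the intermediate coordinates pairwise and
--     # assign each one's direction into one dict, with no intermediate list
--     directions = {}
--     prev = None
--     for j in range(len(chrom) - 1):
--         a, c = chrom[j], chrom[j + 1]
--         step = 1 if a <= c else -1
--         b = a
--         while True:
--             prev = _assign(directions, prev, (b, j + 1))
--             if b == c: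
--                 break
--             b += step
--     _assign(directions, prev, (mazeSizeInY, mazeSizeInX))
--     count = 0
--     for coordinate, direction in directions.items():
--         if maze_map[coordinate][direction] == 0:
--             count += 1
--     return count
-- ===== Notes on version B (the rewrite author's own statement) =====
-- stated objective: alternative
-- what changed: B replaces A's three passes (build the full coordinate list, then a second index-based pass building the direction dict, then the count loop) by a single streaming pass that generates the coordinates pairwise and assigns each one's direction into the dict directly, so the intermediate coordinate list disappears.
import Mathlib
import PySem

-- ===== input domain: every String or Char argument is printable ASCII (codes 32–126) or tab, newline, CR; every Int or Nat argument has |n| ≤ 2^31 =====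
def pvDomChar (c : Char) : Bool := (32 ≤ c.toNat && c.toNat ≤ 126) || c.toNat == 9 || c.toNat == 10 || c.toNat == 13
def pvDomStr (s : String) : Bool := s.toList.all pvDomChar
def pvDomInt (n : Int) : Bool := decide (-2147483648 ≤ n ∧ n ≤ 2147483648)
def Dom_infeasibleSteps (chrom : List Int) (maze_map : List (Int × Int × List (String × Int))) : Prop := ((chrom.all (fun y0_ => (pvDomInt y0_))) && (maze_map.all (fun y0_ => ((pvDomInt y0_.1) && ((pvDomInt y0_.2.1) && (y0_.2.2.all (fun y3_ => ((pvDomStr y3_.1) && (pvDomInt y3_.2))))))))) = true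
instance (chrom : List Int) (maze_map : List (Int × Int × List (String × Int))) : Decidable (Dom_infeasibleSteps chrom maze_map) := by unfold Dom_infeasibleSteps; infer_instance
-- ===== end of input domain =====

-- B fuses A's three passes (coordinate list, direction dict, count) into one streaming
-- pass that assigns each coordinate's direction into the dict directly, with no
-- intermediate coordinate list (objective: alternative decomposition).


-- ===== PORT A =====
-- while (b != chrom[j+1]+1): coord.append((b, var2)); b += 1
-- (A only enters this loop with b ≤ hi; the b ≤ hi guard merely totalizes it)
def ascWhile (b hi var2 : Int) : List (Int × Int) :=
  if h : b ≤ hi then (b, var2) :: ascWhile (b + 1) hi var2 else []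
  termination_by (hi + 1 - b).toNat
  decreasing_by omega

-- while (b != chrom[j+1]-1): coord.append((b, var2)); b -= 1  (entered with lo ≤ b)
def descWhile (b lo var2 : Int) : List (Int × Int) :=
  if h : lo ≤ b then (b, var2) :: descWhile (b - 1) lo var2 else []
  termination_by (b + 1 - lo).toNat
  decreasing_by omega

-- one iteration of the for-j loop of findingCoordinates; state = (coord, b, var2)
def stepA (chrom : List Int) (s : List (Int × Int) × Int × Int) (j : Nat) :
    List (Int × Int) × Int × Int :=
  let cj := chrom.getD j 0
  let cj1 := chrom.getD (j + 1) 0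
  let s1 := if cj < cj1 then (s.1 ++ ascWhile cj cj1 s.2.2, cj1 + 1, s.2.2 + 1) else s
  let s2 := if cj > cj1 then (s1.1 ++ descWhile cj cj1 s1.2.2, cj1 - 1, s1.2.2 + 1) else s1
  if cj = cj1 then (s2.1 ++ [(cj, s2.2.2)], s2.2.1, s2.2.2 + 1) else s2

def findingCoordinates (chrom : List Int) : List (Int × Int) :=
  ((List.range (chrom.length - 1)).foldl (stepA chrom) ([], 0, 1)).1 ++ [(15, 15)]

-- one iteration of the for-i loop of FindingDirections
def fdStep (l : List (Int × Int)) (d : PySem.Dict (Int × Int) String) (i : Nat) :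
    PySem.Dict (Int × Int) String :=
  let ci := l.getD i (0, 0)
  let cn := l.getD (i + 1) (0, 0)
  if ci.1 > cn.1 then d.insert ci "N"
  else if ci.1 < cn.1 then d.insert ci "S"
  else if ci.2 > cn.2 then d.insert ci "W"
  else if ci.2 < cn.2 then d.insert ci "E"
  else d

def FindingDirections (l : List (Int × Int)) : PySem.Dict (Int × Int) String :=
  (List.range (l.length - 1)).foldl (fdStep l) PySem.Dict.empty

-- the final counting loop (identical source code in A and in B):
-- for coordinate, direction in x.items(): if maze_map[coordinate][direction] == 0: count += 1
-- maze_map is a Python dict keyed by (y, x): first-match lookup; a missing key is a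
-- KeyError in Python, excluded by Pre_ (the none branches keep the port total).
def countBlocked (maze_map : List (Int × Int × List (String × Int)))
    (x : PySem.Dict (Int × Int) String) : Int :=
  x.items.foldl (fun acc cd =>
    match maze_map.find? (fun e => e.1 == cd.1.1 && e.2.1 == cd.1.2) with
    | some e =>
      match e.2.2.find? (fun p => p.1 == cd.2) with
      | some p => if p.2 == 0 then acc + 1 else acc
      | none => acc
    | none => acc) 0

def infeasibleSteps (chrom : List Int) (maze_map : List (Int × Int × List (String × Int))) : Int :=
  countBlocked maze_map (FindingDirections (findingCoordinates chrom))

-- ===== PORT B =====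
-- _assign: record the direction from prev to cur (if any); cur becomes the new prev
def assignDir (d : PySem.Dict (Int × Int) String) (prev : Option (Int × Int))
    (cur : Int × Int) : PySem.Dict (Int × Int) String :=
  match prev with
  | none => d
  | some p =>
    if p.1 > cur.1 then d.insert p "N"
    else if p.1 < cur.1 then d.insert p "S"
    else if p.2 > cur.2 then d.insert p "W"
    else if p.2 < cur.2 then d.insert p "E"
    else d

-- the inner while-loop of B, ascending (step = 1); entered with b ≤ c
def walkUp (d : PySem.Dict (Int × Int) String) (prev : Option (Int × Int))
    (b c t : Int) : PySem.Dict (Int × Int) String × Option (Int × Int) :=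
  let cur := (b, t)
  let d' := assignDir d prev cur
  if h : b < c then walkUp d' (some cur) (b + 1) c t else (d', some cur)
  termination_by (c - b).toNat
  decreasing_by omega

-- the inner while-loop of B, descending (step = -1); entered with c < b
def walkDown (d : PySem.Dict (Int × Int) String) (prev : Option (Int × Int))
    (b c t : Int) : PySem.Dict (Int × Int) String × Option (Int × Int) :=
  let cur := (b, t)
  let d' := assignDir d prev cur
  if h : c < b then walkDown d' (some cur) (b - 1) c t else (d', some cur)
  termination_by (b - c).toNat
  decreasing_by omega

-- one iteration of B's for-j loop; state = (directions, prev)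
def stepB (chrom : List Int)
    (s : PySem.Dict (Int × Int) String × Option (Int × Int)) (j : Nat) :
    PySem.Dict (Int × Int) String × Option (Int × Int) :=
  let a := chrom.getD j 0
  let c := chrom.getD (j + 1) 0
  if a ≤ c then walkUp s.1 s.2 a c ((j : Int) + 1)
  else walkDown s.1 s.2 a c ((j : Int) + 1)

def infeasibleSteps_alt (chrom : List Int)
    (maze_map : List (Int × Int × List (String × Int))) : Int :=
  let st := (List.range (chrom.length - 1)).foldl (stepB chrom) (PySem.Dict.empty, none)
  countBlocked maze_map (assignDir st.1 st.2 (15, 15))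

-- ===== PRECONDITION & SPEC =====
-- is the key (coordinate, direction) present in maze_map (a dict of dicts)?
def keyOK (maze_map : List (Int × Int × List (String × Int)))
    (c : Int × Int) (dir : String) : Bool :=
  match maze_map.find? (fun e => e.1 == c.1 && e.2.1 == c.2) with
  | some e => (e.2.2.find? (fun p => p.1 == dir)).isSome
  | none => false

-- all y with lo ≤ y < hi have the key ((y, t), dir): counted from the maze side
-- (equivalent to enumerating the interval, but decidable in O(|maze_map|^2))
def rangeOK (maze_map : List (Int × Int × List (String × Int)))
    (lo hi t : Int) (dir : String) : Bool :=
  if hi ≤ lo then true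
  else
    let ys := (PySem.List.dedup (maze_map.map (fun e => e.1))).filter
      (fun y => decide (lo ≤ y) && decide (y < hi) && keyOK maze_map (y, t) dir)
    decide ((ys.length : Int) = hi - lo)

-- the direction A assigns to the end point of segment j (none: no lookup happens there)
def cornerDirOf (chrom : List Int) (j : Nat) : Option String :=
  let n := chrom.length
  let c := chrom.getD (j + 1) 0
  let t : Int := (j : Int) + 1
  if j + 2 < n then some "E"
  else if c > 15 then some "N"
  else if c < 15 then some "S"
  else if t > 15 then some "W"
  else if t < 15 then some "E"
  else none

-- step j of A is safe: the interior coordinates of the straight segment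
-- chrom[j]..chrom[j+1] (direction S or N) and its end point are all present
def stepOK (chrom : List Int) (maze_map : List (Int × Int × List (String × Int)))
    (j : Nat) : Bool :=
  let a := chrom.getD j 0
  let c := chrom.getD (j + 1) 0
  let t : Int := (j : Int) + 1
  let interior :=
    if a < c then rangeOK maze_map a c t "S"
    else if c < a then rangeOK maze_map (c + 1) (a + 1) t "N"
    else true
  let corner :=
    match cornerDirOf chrom j with
    | some dir => keyOK maze_map (c, t) dir
    | none => true
  interior && corner

-- exactly the inputs on which A returns normally: every coordinate/direction pair the
-- count loop looks up must be present in maze_map (otherwise Python raises KeyError)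
def Pre_infeasibleSteps (chrom : List Int)
    (maze_map : List (Int × Int × List (String × Int))) : Prop :=
  ∀ j ∈ List.range (chrom.length - 1), stepOK chrom maze_map j = true

instance (chrom : List Int) (maze_map : List (Int × Int × List (String × Int))) :
    Decidable (Pre_infeasibleSteps chrom maze_map) := by
  unfold Pre_infeasibleSteps; infer_instance

def pvWitness_infeasibleSteps : List Int × (List (Int × Int × List (String × Int))) :=
  ([0, 1], [(0, 1, [("S", 1)]), (1, 1, [("S", 0)])])

def Spec_infeasibleSteps (chrom : List Int) (maze_map : List (Int × Int × List (String × Int))) (out : Int) : Prop := out = infeasibleSteps_alt chrom maze_map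
instance (chrom : List Int) (maze_map : List (Int × Int × List (String × Int))) (out : Int) : Decidable (Spec_infeasibleSteps chrom maze_map out) := by unfold Spec_infeasibleSteps; infer_instance

-- ===== CLAIM (what is proved, stated in full; the proofs are below) =====
def Claim_equal_infeasibleSteps : Prop := ∀ (chrom : List Int) (maze_map : List (Int × Int × List (String × Int))), Dom_infeasibleSteps chrom maze_map → Pre_infeasibleSteps chrom maze_map → Spec_infeasibleSteps chrom maze_map (infeasibleSteps chrom maze_map)

-- ===== LEMMAS AND PROOFS =====

-- B's state transformer for a list of generated coordinates
def extendP (s : PySem.Dict (Int × Int) String × Option (Int × Int))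
    (l : List (Int × Int)) : PySem.Dict (Int × Int) String × Option (Int × Int) :=
  l.foldl (fun s cur => (assignDir s.1 s.2 cur, some cur)) s

-- the coordinates A appends during iteration j
def segOf (chrom : List Int) (j : Nat) : List (Int × Int) :=
  let a := chrom.getD j 0
  let c := chrom.getD (j + 1) 0
  if a ≤ c then ascWhile a c ((j : Int) + 1) else descWhile a c ((j : Int) + 1)

theorem extendP_append (s : PySem.Dict (Int × Int) String × Option (Int × Int))
    (l1 l2 : List (Int × Int)) : extendP s (l1 ++ l2) = extendP (extendP s l1) l2 :=
  List.foldl_append ..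

theorem ascWhile_nil (b hi t : Int) (h : hi < b) : ascWhile b hi t = [] := by
  rw [ascWhile]; simp [not_le.mpr h]

theorem ascWhile_self (a t : Int) : ascWhile a a t = [(a, t)] := by
  rw [ascWhile]; simp [ascWhile_nil _ _ _ (by omega : a < a + 1)]

theorem walkUp_eq (b c t : Int) (h : b ≤ c) :
    ∀ d prev, walkUp d prev b c t = extendP (d, prev) (ascWhile b c t) := by
  have H : ∀ (n : Nat) (b : Int), (c - b).toNat = n → b ≤ c → ∀ d prev,
      walkUp d prev b c t = extendP (d, prev) (ascWhile b c t) := by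
    intro n
    induction n with
    | zero =>
      intro b hn hb d prev
      have hbc : b = c := by omega
      subst hbc
      rw [walkUp, ascWhile]
      simp [ascWhile_nil _ _ _ (by omega : b < b + 1), extendP]
    | succ k ih =>
      intro b hn hb d prev
      have hlt : b < c := by omega
      rw [walkUp, ascWhile]
      simp only [hlt, dif_pos, hb, dif_pos]
      rw [ih (b + 1) (by omega) (by omega)]
      simp [extendP]
  exact H _ b rfl h

theorem descWhile_nil (b lo t : Int) (h : b < lo) : descWhile b lo t = [] := by
  rw [descWhile]; simp [not_le.mpr h]

theorem walkDown_eq (b c t : Int) (h : c ≤ b) :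
    ∀ d prev, walkDown d prev b c t = extendP (d, prev) (descWhile b c t) := by
  have H : ∀ (n : Nat) (b : Int), (b - c).toNat = n → c ≤ b → ∀ d prev,
      walkDown d prev b c t = extendP (d, prev) (descWhile b c t) := by
    intro n
    induction n with
    | zero =>
      intro b hn hb d prev
      have hbc : b = c := by omega
      subst hbc
      rw [walkDown, descWhile]
      simp [descWhile_nil _ _ _ (by omega : b - 1 < b), extendP]
    | succ k ih =>
      intro b hn hb d prev
      have hlt : c < b := by omega
      rw [walkDown, descWhile]
      simp only [hlt, dif_pos, hb, dif_pos]
      rw [ih (b - 1) (by omega) (by omega)]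
      simp [extendP]
  exact H _ b rfl h

theorem stepB_eq (chrom : List Int) (s : PySem.Dict (Int × Int) String × Option (Int × Int))
    (j : Nat) : stepB chrom s j = extendP s (segOf chrom j) := by
  unfold stepB segOf
  by_cases h : chrom.getD j 0 ≤ chrom.getD (j + 1) 0
  · simp only [h, if_pos]
    rw [walkUp_eq _ _ _ h]
  · simp only [h, ite_false]
    rw [walkDown_eq _ _ _ (not_le.mp h).le]

theorem stepA_eq (chrom : List Int) (C : List (Int × Int)) (b : Int) (j : Nat) :
    ∃ b', stepA chrom (C, b, (j : Int) + 1) j = (C ++ segOf chrom j, b', (j : Int) + 2) := by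
  unfold stepA segOf
  generalize chrom.getD j 0 = a
  generalize chrom.getD (j + 1) 0 = c
  rcases lt_trichotomy a c with h | h | h
  · refine ⟨c + 1, ?_⟩
    simp only [if_pos h, if_neg (not_lt.mpr h.le), if_neg h.ne, if_pos h.le]
    ring_nf
  · subst h
    refine ⟨b, ?_⟩
    simp [ascWhile_self]
    ring_nf
  · refine ⟨c - 1, ?_⟩
    simp only [if_neg (not_lt.mpr h.le), if_pos h, if_neg h.ne', if_neg (not_le.mpr h)]
    ring_nf

theorem fold_A (chrom : List Int) (m : Nat) :
    ∃ b', (List.range m).foldl (stepA chrom) ([], 0, 1) =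
      ((List.range m).flatMap (segOf chrom), b', (m : Int) + 1) := by
  induction m with
  | zero => exact ⟨0, by norm_num⟩
  | succ k ih =>
    obtain ⟨b', hb⟩ := ih
    rw [List.range_succ, List.foldl_append, hb, List.flatMap_append]
    obtain ⟨b'', hb''⟩ := stepA_eq chrom ((List.range k).flatMap (segOf chrom)) b' k
    refine ⟨b'', ?_⟩
    simp only [List.foldl_cons, List.foldl_nil, hb'', List.flatMap_cons, List.flatMap_nil,
      List.append_nil]
    have : ((k : Int) + 2) = ((k + 1 : Nat) : Int) + 1 := by push_cast; ring
    rw [this]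

theorem fold_B (chrom : List Int) (m : Nat) :
    (List.range m).foldl (stepB chrom) (PySem.Dict.empty, none) =
      extendP (PySem.Dict.empty, none) ((List.range m).flatMap (segOf chrom)) := by
  induction m with
  | zero => rfl
  | succ k ih =>
    rw [List.range_succ, List.foldl_append, ih, List.flatMap_append, extendP_append]
    simp only [List.foldl_cons, List.foldl_nil, List.flatMap_cons, List.flatMap_nil,
      List.append_nil]
    exact stepB_eq ..

theorem fdStep_shift (x : Int × Int) (l : List (Int × Int))
    (d : PySem.Dict (Int × Int) String) (i : Nat) :
    fdStep (x :: l) d (i + 1) = fdStep l d i := by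
  simp [fdStep]

theorem fdStep_zero (x y : Int × Int) (l : List (Int × Int))
    (d : PySem.Dict (Int × Int) String) :
    fdStep (x :: y :: l) d 0 = assignDir d (some x) y := rfl

theorem FD_cons (l : List (Int × Int)) :
    ∀ (x : Int × Int) (d : PySem.Dict (Int × Int) String),
      (List.range ((x :: l).length - 1)).foldl (fdStep (x :: l)) d =
        (extendP (d, some x) l).1 := by
  induction l with
  | nil => intro x d; rfl
  | cons y rest ih =>
    intro x d
    have hlen : (x :: y :: rest).length - 1 = rest.length + 1 := by simp
    rw [hlen, List.range_succ_eq_map, List.foldl_cons, List.foldl_map]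
    have hfun : (fun (d : PySem.Dict (Int × Int) String) (i : Nat) =>
        fdStep (x :: y :: rest) d i.succ) = fdStep (y :: rest) := by
      funext d i
      exact fdStep_shift x (y :: rest) d i
    rw [hfun, fdStep_zero]
    have := ih y (assignDir d (some x) y)
    simp only [List.length_cons, Nat.add_sub_cancel] at this
    rw [this]
    simp [extendP]

theorem FD_eq (l : List (Int × Int)) :
    FindingDirections l = (extendP (PySem.Dict.empty, none) l).1 := by
  cases l with
  | nil => rfl
  | cons x rest =>
    unfold FindingDirections
    rw [FD_cons]
    simp [extendP, assignDir]

-- ===== VERDICT (by name: the statement is the Claim_ definition above) =====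
theorem infeasibleSteps_spec : Claim_equal_infeasibleSteps := by
  intro chrom maze_map _ _
  unfold Spec_infeasibleSteps infeasibleSteps infeasibleSteps_alt findingCoordinates
  obtain ⟨b', hA⟩ := fold_A chrom (chrom.length - 1)
  rw [hA, fold_B chrom (chrom.length - 1)]
  congr 1
  rw [FD_eq, extendP_append]
  simp [extendP]
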